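-- pv_equiv track=rewrite | github.com/brolyp/CATT | tCAT.py | vocab_transform
-- ===== SOURCE A (Python) =====
-- PAD_IDX = 'O'
--
-- MAX_LEN = 16
--
-- def vocab_transform(seq):
--     assert len(seq) <= MAX_LEN
--     t = []
--     for a in seq:
--         t.append(a)
--     k = len(t) // 2
--     t = t[:k] + [PAD_IDX]*(MAX_LEN-len(t)) + t[k:]
--     return t
-- ===== SOURCE B (Python) =====
-- PAD_IDX = 'O'
--
-- MAX_LEN = 16
--
-- def vocab_transform(seq):
--     assert len(seq) <= MAX_LEN
--     n = len(seq)
--     k = n // 2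
--     result = [PAD_IDX] * MAX_LEN
--     for j, a in enumerate(seq):
--         result[j if j < k else MAX_LEN - n + j] = a
--     return result
-- ===== Notes on version B (the rewrite author's own statement) =====
-- stated objective: alternative
-- what changed: B scatters each element directly into a pre-padded fixed-length buffer at its final position (head part at j, tail part at MAX_LEN-n+j), instead of copying seq into a temp list and concatenating three slices.
import Mathlib
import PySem

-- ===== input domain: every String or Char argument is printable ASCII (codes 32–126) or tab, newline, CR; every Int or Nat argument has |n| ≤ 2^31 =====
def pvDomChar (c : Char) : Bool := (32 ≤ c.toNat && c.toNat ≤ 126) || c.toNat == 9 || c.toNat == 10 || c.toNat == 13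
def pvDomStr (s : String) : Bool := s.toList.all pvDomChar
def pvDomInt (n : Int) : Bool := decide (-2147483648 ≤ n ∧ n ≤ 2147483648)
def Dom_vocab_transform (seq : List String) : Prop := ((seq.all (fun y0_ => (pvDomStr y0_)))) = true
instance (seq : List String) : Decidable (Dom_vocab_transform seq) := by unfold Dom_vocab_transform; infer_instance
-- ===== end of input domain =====

-- B scatters each element directly into a pre-padded fixed-length buffer instead of
-- concatenating three slices (alternative decomposition, same cost).

-- ===== PORT A =====
-- t = []; for a in seq: t.append(a); k = len(t)//2; t = t[:k] + [PAD]*(16-len(t)) + t[k:]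
def vocab_transform (seq : List String) : List String :=
  let t := seq.foldl (fun t a => t ++ [a]) []
  let k := t.length / 2
  PySem.List.slice t none (some (k : Int))
    ++ PySem.List.pyRepeat ["O"] (16 - (t.length : Int))
    ++ PySem.List.slice t (some (k : Int)) none

-- ===== PORT B =====
-- result = ['O']*16; for j,a in enumerate(seq): result[j if j<k else 16-n+j] = a
def vocab_transform_alt (seq : List String) : List String :=
  let n := seq.length
  let k := n / 2
  (PySem.List.enumerate seq 0).foldl
    (fun result p =>
      result.set (if p.1 < (k : Int) then p.1 else 16 - (n : Int) + p.1).toNat p.2)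
    (List.replicate 16 "O")

-- ===== PRECONDITION & SPEC =====
-- Pre_: Python A raises AssertionError when len(seq) > 16; Pre_ excludes exactly those inputs.
def Pre_vocab_transform (seq : List String) : Prop := seq.length ≤ 16
instance (seq : List String) : Decidable (Pre_vocab_transform seq) := by
  unfold Pre_vocab_transform; infer_instance
def pvWitness_vocab_transform : List String := (["a", "b", "c"])

def Spec_vocab_transform (seq : List String) (out : List String) : Prop := out = vocab_transform_alt seq
instance (seq : List String) (out : List String) : Decidable (Spec_vocab_transform seq out) := by unfold Spec_vocab_transform; infer_instance

-- ===== CLAIM (what is proved, stated in full; the proofs are below) =====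
def Claim_equal_vocab_transform : Prop := ∀ (seq : List String), Dom_vocab_transform seq → Pre_vocab_transform seq → Spec_vocab_transform seq (vocab_transform seq)

-- ===== LEMMAS AND PROOFS =====
-- The precondition bounds the length by 16; the proof enumerates the 17 possible
-- lengths and evaluates both ports symbolically on each shape.

-- ===== VERDICT (by name: the statement is the Claim_ definition above) =====
theorem vocab_transform_spec : Claim_equal_vocab_transform := by
  intro seq _ hpre
  unfold Pre_vocab_transform at hpre
  unfold Spec_vocab_transform
  rcases seq with _ | ⟨a1, seq⟩
  ·
    simp [vocab_transform, vocab_transform_alt, PySem.List.slice, PySem.List.clampIdx, PySem.List.pyRepeat,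
      PySem.List.enumerate, List.replicate, List.foldl]
  rcases seq with _ | ⟨a2, seq⟩
  ·
    simp [vocab_transform, vocab_transform_alt, PySem.List.slice, PySem.List.clampIdx, PySem.List.pyRepeat,
      PySem.List.enumerate, List.replicate, List.foldl]
  rcases seq with _ | ⟨a3, seq⟩
  ·
    simp [vocab_transform, vocab_transform_alt, PySem.List.slice, PySem.List.clampIdx, PySem.List.pyRepeat,
      PySem.List.enumerate, List.replicate, List.foldl]
  rcases seq with _ | ⟨a4, seq⟩
  ·
    simp [vocab_transform, vocab_transform_alt, PySem.List.slice, PySem.List.clampIdx, PySem.List.pyRepeat,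
      PySem.List.enumerate, List.replicate, List.foldl]
  rcases seq with _ | ⟨a5, seq⟩
  ·
    simp [vocab_transform, vocab_transform_alt, PySem.List.slice, PySem.List.clampIdx, PySem.List.pyRepeat,
      PySem.List.enumerate, List.replicate, List.foldl]
  rcases seq with _ | ⟨a6, seq⟩
  ·
    simp [vocab_transform, vocab_transform_alt, PySem.List.slice, PySem.List.clampIdx, PySem.List.pyRepeat,
      PySem.List.enumerate, List.replicate, List.foldl]
  rcases seq with _ | ⟨a7, seq⟩
  ·
    simp [vocab_transform, vocab_transform_alt, PySem.List.slice, PySem.List.clampIdx, PySem.List.pyRepeat,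
      PySem.List.enumerate, List.replicate, List.foldl]
  rcases seq with _ | ⟨a8, seq⟩
  ·
    simp [vocab_transform, vocab_transform_alt, PySem.List.slice, PySem.List.clampIdx, PySem.List.pyRepeat,
      PySem.List.enumerate, List.replicate, List.foldl]
  rcases seq with _ | ⟨a9, seq⟩
  ·
    simp [vocab_transform, vocab_transform_alt, PySem.List.slice, PySem.List.clampIdx, PySem.List.pyRepeat,
      PySem.List.enumerate, List.replicate, List.foldl]
  rcases seq with _ | ⟨a10, seq⟩
  ·
    simp [vocab_transform, vocab_transform_alt, PySem.List.slice, PySem.List.clampIdx, PySem.List.pyRepeat,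
      PySem.List.enumerate, List.replicate, List.foldl]
  rcases seq with _ | ⟨a11, seq⟩
  ·
    simp [vocab_transform, vocab_transform_alt, PySem.List.slice, PySem.List.clampIdx, PySem.List.pyRepeat,
      PySem.List.enumerate, List.replicate, List.foldl]
  rcases seq with _ | ⟨a12, seq⟩
  ·
    simp [vocab_transform, vocab_transform_alt, PySem.List.slice, PySem.List.clampIdx, PySem.List.pyRepeat,
      PySem.List.enumerate, List.replicate, List.foldl]
  rcases seq with _ | ⟨a13, seq⟩
  ·
    simp [vocab_transform, vocab_transform_alt, PySem.List.slice, PySem.List.clampIdx, PySem.List.pyRepeat,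
      PySem.List.enumerate, List.replicate, List.foldl]
  rcases seq with _ | ⟨a14, seq⟩
  ·
    simp [vocab_transform, vocab_transform_alt, PySem.List.slice, PySem.List.clampIdx, PySem.List.pyRepeat,
      PySem.List.enumerate, List.replicate, List.foldl]
  rcases seq with _ | ⟨a15, seq⟩
  ·
    simp [vocab_transform, vocab_transform_alt, PySem.List.slice, PySem.List.clampIdx, PySem.List.pyRepeat,
      PySem.List.enumerate, List.replicate, List.foldl]
  rcases seq with _ | ⟨a16, seq⟩
  ·
    simp [vocab_transform, vocab_transform_alt, PySem.List.slice, PySem.List.clampIdx, PySem.List.pyRepeat,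
      PySem.List.enumerate, List.replicate, List.foldl]
  rcases seq with _ | ⟨a17, seq⟩
  ·
    simp [vocab_transform, vocab_transform_alt, PySem.List.slice, PySem.List.clampIdx, PySem.List.pyRepeat,
      PySem.List.enumerate, List.replicate, List.foldl]
  · exfalso; simp only [List.length_cons] at hpre; omega
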